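-- pv_equiv track=rewrite | github.com/askges20/programmers_code | Level2/피로도.py | find
-- ===== SOURCE A (Python) =====
-- def find(cur, path):
--     cnt = 0
--     for dungeon in path:
--         if cur < dungeon[0]:
--             return cnt
--         else:
--             cur = cur - dungeon[1]
--             cnt += 1
--     return cnt
-- ===== SOURCE B (Python) =====
-- def find(cur, path):
--     # exclusive prefix sums of the fatigue costs: spent[i] = fatigue spent before dungeon i
--     spent = [0]
--     for d in path:
--         spent.append(spent[-1] + d[1])
--     # first dungeon whose minimum requirement exceeds the fatigue available before it
--     for i, d in enumerate(path):
--         if cur - spent[i] < d[0]: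
--             return i
--     return len(path)
-- ===== Notes on version B (the rewrite author's own statement) =====
-- stated objective: alternative
-- what changed: B replaces A's single running-fatigue loop with exclusive prefix sums of the costs built in one pass, then a scan comparing available fatigue (cur - spent[i]) against each dungeon's requirement, returning the first failing index.
-- outside the precondition, e.g. on find(0, [[5]]): A returns 0, B raises IndexError
import Mathlib
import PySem

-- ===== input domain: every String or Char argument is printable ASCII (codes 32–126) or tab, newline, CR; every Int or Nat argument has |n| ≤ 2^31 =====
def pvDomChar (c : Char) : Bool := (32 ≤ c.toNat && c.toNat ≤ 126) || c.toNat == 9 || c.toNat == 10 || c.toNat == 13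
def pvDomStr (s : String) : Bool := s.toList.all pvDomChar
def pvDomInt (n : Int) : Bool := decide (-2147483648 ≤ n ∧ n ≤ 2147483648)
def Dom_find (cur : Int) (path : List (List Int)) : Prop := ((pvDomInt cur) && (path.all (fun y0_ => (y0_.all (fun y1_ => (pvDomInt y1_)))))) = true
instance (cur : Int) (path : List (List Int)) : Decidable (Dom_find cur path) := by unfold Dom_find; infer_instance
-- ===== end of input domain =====

-- B builds exclusive prefix sums of the costs, then scans for the first dungeon whose
-- requirement exceeds the fatigue available before it (alternative decomposition, same cost).


-- ===== PORT A =====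
-- literal transliteration of A's for-loop; `none` models an IndexError on a short dungeon
def findLoopA (cur cnt : Int) : List (List Int) → Option Int
  | [] => some cnt
  | d :: rest =>
    match PySem.List.pyGet? d 0 with
    | none => none
    | some d0 =>
      if cur < d0 then some cnt
      else
        match PySem.List.pyGet? d 1 with
        | none => none
        | some d1 => findLoopA (cur - d1) (cnt + 1) rest

def find (cur : Int) (path : List (List Int)) : Int := (findLoopA cur 0 path).getD 0

-- ===== PORT B =====
-- first pass of Source B: spent = [0]; for d in path: spent.append(spent[-1] + d[1])
-- (pyGetD default 0 is never used under Pre_: spent is nonempty and every d has ≥ 2 entries)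
def spentB (path : List (List Int)) : List Int :=
  path.foldl (fun spent d =>
    spent ++ [PySem.List.pyGetD spent (-1) 0 + PySem.List.pyGetD d 1 0]) [0]

-- second pass of Source B: for i, d in enumerate(path): if cur - spent[i] < d[0]: return i
def findLoopB (cur : Int) (spent : List Int) (i : Nat) : List (List Int) → Option Int
  | [] => none
  | d :: rest =>
    if cur - PySem.List.pyGetD spent (i : Int) 0 < PySem.List.pyGetD d 0 0 then some (i : Int)
    else findLoopB cur spent (i + 1) rest

def find_alt (cur : Int) (path : List (List Int)) : Int :=
  match findLoopB cur (spentB path) 0 path with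
  | some i => i
  | none => (path.length : Int)

-- ===== PRECONDITION & SPEC =====
-- Pre_ excludes dungeons with fewer than 2 entries: both programs index d[0]/d[1] (IndexError);
-- A can also return early before reaching such a dungeon while B's prefix pass reads every d[1].
def Pre_find (_cur : Int) (path : List (List Int)) : Prop :=
  ∀ d ∈ path, 2 ≤ d.length
instance (cur : Int) (path : List (List Int)) : Decidable (Pre_find cur path) := by
  unfold Pre_find; infer_instance

def pvWitness_find : Int × List (List Int) := (10, [[3, 4], [5, 6], [2, 1]])

def Spec_find (cur : Int) (path : List (List Int)) (out : Int) : Prop := out = find_alt cur path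
instance (cur : Int) (path : List (List Int)) (out : Int) : Decidable (Spec_find cur path out) := by unfold Spec_find; infer_instance

-- ===== CLAIM (what is proved, stated in full; the proofs are below) =====
def Claim_equal_find : Prop := ∀ (cur : Int) (path : List (List Int)), Dom_find cur path → Pre_find cur path → Spec_find cur path (find cur path)

-- ===== LEMMAS AND PROOFS =====

-- reference count: how many dungeons are cleared (Nat form)
def refN (cur : Int) : List (List Int) → Nat
  | [] => 0
  | d :: rest =>
    if cur < d.getD 0 0 then 0 else 1 + refN (cur - d.getD 1 0) rest

-- exclusive prefix sums starting at a
def ps (a : Int) : List (List Int) → List Int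
  | [] => [a]
  | d :: rest => a :: ps (a + d.getD 1 0) rest

lemma spentB_fold (l : List (List Int)) : ∀ (pre : List Int) (a : Int),
    l.foldl (fun spent d =>
      spent ++ [PySem.List.pyGetD spent (-1) 0 + PySem.List.pyGetD d 1 0]) (pre ++ [a])
      = pre ++ ps a l := by
  induction l with
  | nil => intro pre a; simp [ps]
  | cons d t ih =>
    intro pre a
    simp only [List.foldl_cons, PySem.List.pyGetD_neg_one_append_singleton]
    rw [ih (pre ++ [a]) (a + PySem.List.pyGetD d 1 0)]
    have hd1 : PySem.List.pyGetD d 1 0 = d.getD 1 0 := by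
      simpa using PySem.List.pyGetD_natCast (xs := d) (n := 1) (d := 0)
    simp [ps, hd1]

lemma spentB_eq (path : List (List Int)) : spentB path = ps 0 path := by
  have := spentB_fold path [] 0
  simpa [spentB] using this

lemma findLoopA_eq (cur cnt : Int) (l : List (List Int))
    (h : ∀ d ∈ l, 2 ≤ d.length) :
    findLoopA cur cnt l = some (cnt + (refN cur l : Int)) := by
  induction l generalizing cur cnt with
  | nil => simp [findLoopA, refN]
  | cons d t ih =>
    have hd : 2 ≤ d.length := h d (by simp)
    have h0 : PySem.List.pyGet? d 0 = some (d.getD 0 0) := by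
      have := PySem.List.pyGet?_natCast (xs := d) (n := 0)
      simp only [Int.natCast_zero] at this
      rw [this]
      cases d with
      | nil => simp at hd
      | cons x xs => simp [List.getD]
    have h1 : PySem.List.pyGet? d 1 = some (d.getD 1 0) := by
      have := PySem.List.pyGet?_natCast (xs := d) (n := 1)
      simp only [Int.natCast_one] at this
      rw [this]
      match d, hd with
      | x :: y :: xs, _ => simp [List.getD]
    simp only [findLoopA, h0, h1, refN]
    split_ifs with hc
    · simp
    · rw [ih _ _ (fun d hd => h d (by simp [hd]))]
      congr 1
      push_cast
      ring

lemma findLoopB_eq (cur : Int) (l : List (List Int)) :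
    ∀ (pre : List Int) (a : Int), (∀ d ∈ l, 2 ≤ d.length) →
    findLoopB cur (pre ++ ps a l) pre.length l
      = if refN (cur - a) l = l.length then none
        else some ((pre.length : Int) + (refN (cur - a) l : Int)) := by
  induction l with
  | nil => intro pre a _; simp [findLoopB, refN]
  | cons d t ih =>
    intro pre a h
    have hd : 2 ≤ d.length := h d (by simp)
    have hs : pre ++ ps a (d :: t) = pre ++ a :: ps (a + d.getD 1 0) t := by simp [ps]
    have hget : PySem.List.pyGetD (pre ++ a :: ps (a + d.getD 1 0) t) (pre.length : Int) 0 = a := by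
      rw [PySem.List.pyGetD_natCast]
      simp [List.getD]
    have hd0 : PySem.List.pyGetD d 0 0 = d.getD 0 0 := by
      simpa using PySem.List.pyGetD_natCast (xs := d) (n := 0) (d := 0)
    rw [hs]
    simp only [findLoopB, hget, hd0]
    by_cases hc : cur - a < d.getD 0 0
    · rw [if_pos hc]
      have hr : refN (cur - a) (d :: t) = 0 := by simp only [refN]; rw [if_pos hc]
      rw [hr, if_neg (by simp)]
      simp
    · rw [if_neg hc,
        show pre ++ a :: ps (a + d.getD 1 0) t = (pre ++ [a]) ++ ps (a + d.getD 1 0) t by simp,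
        show pre.length + 1 = (pre ++ [a]).length by simp,
        ih (pre ++ [a]) _ (fun d hd => h d (by simp [hd]))]
      have hr : refN (cur - a) (d :: t) = 1 + refN (cur - a - d.getD 1 0) t := by
        simp only [refN]; rw [if_neg hc]
      have harg : cur - (a + d.getD 1 0) = cur - a - d.getD 1 0 := by ring
      rw [hr, harg]
      by_cases h1 : refN (cur - a - d.getD 1 0) t = t.length
      · rw [if_pos h1, if_pos (by simp only [List.length_cons]; omega)]
      · rw [if_neg h1, if_neg (by simp only [List.length_cons]; omega)]
        congr 1
        simp only [List.length_append, List.length_cons, List.length_nil]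
        push_cast
        ring

lemma find_eq_refN (cur : Int) (path : List (List Int)) (h : Pre_find cur path) :
    find cur path = (refN cur path : Int) := by
  unfold find
  rw [findLoopA_eq cur 0 path h]
  simp

lemma find_alt_eq_refN (cur : Int) (path : List (List Int)) (h : Pre_find cur path) :
    find_alt cur path = (refN cur path : Int) := by
  unfold find_alt
  rw [spentB_eq]
  have := findLoopB_eq cur path [] 0 h
  simp only [List.nil_append, List.length_nil, Int.natCast_zero, zero_add, sub_zero] at this
  rw [this]
  split_ifs with hc
  · simp [hc]
  · simp

-- ===== VERDICT (by name: the statement is the Claim_ definition above) =====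
theorem find_spec : Claim_equal_find := by
  intro cur path _ hpre
  unfold Spec_find
  rw [find_eq_refN cur path hpre, find_alt_eq_refN cur path hpre]
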